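-- pv_equiv track=rewrite | github.com/danix-au/conversation-analyser | app/streamlit_dashboard.py | parse_pipe_values
-- ===== SOURCE A (Python) =====
-- from typing import Iterable
--
-- def parse_pipe_values(values: Iterable[str]) -> list[str]:
--     items: list[str] = []
--     for value in values:
--         if value is None:
--             continue
--         for part in str(value).split("|"):
--             cleaned = part.strip()
--             if cleaned:
--                 items.append(cleaned)
--     return items
-- ===== SOURCE B (Python) =====
-- def parse_pipe_values(values):
--     parts = "|".join(str(v) for v in values if v is not None).split("|")
--     return [c for p in parts if (c := p.strip())]
-- ===== Notes on version B (the rewrite author's own statement) =====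
-- stated objective: alternative
-- what changed: B replaces A's nested per-value split loop with a single concatenate-then-split pass: join all values with '|', split the one resulting string on '|' once, then strip-and-filter the tokens in one comprehension.
import Mathlib
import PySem

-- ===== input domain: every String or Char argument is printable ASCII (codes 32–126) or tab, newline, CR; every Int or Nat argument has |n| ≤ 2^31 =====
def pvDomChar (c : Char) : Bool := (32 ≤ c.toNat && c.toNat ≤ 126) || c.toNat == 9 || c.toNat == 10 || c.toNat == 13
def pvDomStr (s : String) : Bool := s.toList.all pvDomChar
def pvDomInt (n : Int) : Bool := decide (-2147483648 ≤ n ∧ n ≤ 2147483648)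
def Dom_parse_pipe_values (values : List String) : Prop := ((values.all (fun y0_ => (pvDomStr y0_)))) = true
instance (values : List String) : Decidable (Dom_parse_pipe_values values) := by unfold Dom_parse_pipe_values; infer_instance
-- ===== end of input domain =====

-- B builds one '|'-joined string and splits it once instead of A's nested per-value split loop; same cost, different decomposition.

-- ===== PORT A =====
def parse_pipe_values (values : List String) : List String :=
  values.foldl (fun items value =>
    -- value.split("|"): sep is non-empty, so split? never raises; getD [] is unreachable
    ((PySem.Str.split? value "|").getD []).foldl (fun items part =>
      let cleaned := PySem.Str.strip part
      if cleaned ≠ "" then items ++ [cleaned] else items) items) []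

-- ===== PORT B =====
def parse_pipe_values_alt (values : List String) : List String :=
  let parts := (PySem.Str.split? (PySem.Str.join "|" values) "|").getD []
  parts.filterMap (fun p =>
    let c := PySem.Str.strip p
    if c = "" then none else some c)

-- ===== PRECONDITION & SPEC =====
def Spec_parse_pipe_values (values : List String) (out : List String) : Prop := out = parse_pipe_values_alt values
instance (values : List String) (out : List String) : Decidable (Spec_parse_pipe_values values out) := by unfold Spec_parse_pipe_values; infer_instance

-- ===== CLAIM (what is proved, stated in full; the proofs are below) =====
def Claim_equal_parse_pipe_values : Prop := ∀ (values : List String), Dom_parse_pipe_values values → Spec_parse_pipe_values values (parse_pipe_values values)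

-- ===== LEMMAS AND PROOFS =====

-- simple structural characterisation of splitting on the single character '|'
def spPipe : List Char → List (List Char)
  | [] => [[]]
  | c :: rest =>
    if c = '|' then [] :: spPipe rest
    else match spPipe rest with
      | [] => [[c]]
      | p :: ps => (c :: p) :: ps

theorem spPipe_ne_nil (l : List Char) : spPipe l ≠ [] := by
  cases l with
  | nil => simp [spPipe]
  | cons c rest =>
    simp only [spPipe]
    split
    · simp
    · cases h : spPipe rest <;> simp

theorem go_pipe_eq (fuel : Nat) :
    ∀ (l cur : List Char) (acc : List (List Char)), l.length ≤ fuel →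
      PySem.Chars.splitOn.go ['|'] fuel l cur acc =
        acc.reverse ++ (match spPipe l with
          | [] => []
          | p :: ps => (cur.reverse ++ p) :: ps) := by
  induction fuel with
  | zero =>
    intro l cur acc h
    have : l = [] := List.eq_nil_of_length_eq_zero (Nat.le_zero.mp h)
    subst this
    simp [PySem.Chars.splitOn.go, spPipe]
  | succ fuel ih =>
    intro l cur acc h
    cases l with
    | nil => simp [PySem.Chars.splitOn.go, spPipe]
    | cons c rest =>
      simp only [PySem.Chars.splitOn.go]
      by_cases hc : c = '|'
      · subst hc
        have hpref : List.isPrefixOf ['|'] ('|' :: rest) = true := by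
          simp [List.isPrefixOf]
        rw [if_pos hpref]
        have : List.drop (List.length ['|']) ('|' :: rest) = rest := by simp
        rw [this, ih rest [] (cur.reverse :: acc) (by simpa using Nat.le_of_succ_le_succ h)]
        cases hsp : spPipe rest with
        | nil => exact absurd hsp (spPipe_ne_nil rest)
        | cons p ps => simp [spPipe, hsp]
      · have hpref : List.isPrefixOf ['|'] (c :: rest) = false := by
          simp [List.isPrefixOf]
          exact fun h => hc (Eq.symm h)
        rw [if_neg (by simp [hpref])]
        rw [ih rest (c :: cur) acc (by simpa using Nat.le_of_succ_le_succ h)]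
        cases hsp : spPipe rest with
        | nil => exact absurd hsp (spPipe_ne_nil rest)
        | cons p ps => simp [spPipe, hc, hsp]

theorem splitOn_pipe (s : List Char) : PySem.Chars.splitOn s ['|'] = spPipe s := by
  unfold PySem.Chars.splitOn
  rw [go_pipe_eq (s.length + 1) s [] [] (Nat.le_succ _)]
  cases hsp : spPipe s with
  | nil => exact absurd hsp (spPipe_ne_nil s)
  | cons p ps => simp

theorem spPipe_append (a b : List Char) : spPipe (a ++ '|' :: b) = spPipe a ++ spPipe b := by
  induction a with
  | nil => simp [spPipe]
  | cons c a ih =>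
    by_cases hc : c = '|'
    · subst hc; simp [spPipe, ih]
    · simp only [List.cons_append, spPipe, hc, if_false, ih]
      cases hsp : spPipe a with
      | nil => exact absurd hsp (spPipe_ne_nil a)
      | cons p ps => simp

theorem spPipe_join (vs : List (List Char)) (h : vs ≠ []) :
    spPipe (PySem.Chars.join ['|'] vs) = vs.flatMap spPipe := by
  induction vs with
  | nil => exact absurd rfl h
  | cons v vs ih =>
    cases vs with
    | nil => simp [PySem.Chars.join_singleton]
    | cons w ws =>
      rw [PySem.Chars.join_cons_cons]
      have : v ++ ['|'] ++ PySem.Chars.join ['|'] (w :: ws)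
           = v ++ '|' :: PySem.Chars.join ['|'] (w :: ws) := by simp
      rw [this, spPipe_append, ih (by simp)]
      simp

-- the token-cleaning step shared by both ports
def cleanTok (p : String) : Option String :=
  let c := PySem.Str.strip p
  if c = "" then none else some c

theorem filterMap_clean_eq (l : List String) :
    l.filterMap cleanTok
      = (l.filter (fun p => PySem.Str.strip p ≠ "")).map PySem.Str.strip := by
  induction l with
  | nil => rfl
  | cons p l ih =>
    by_cases hp : PySem.Str.strip p = ""
    · have hct : cleanTok p = none := by simp [cleanTok, hp]
      rw [List.filterMap_cons, hct, ih]; simp [hp]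
    · have hct : cleanTok p = some (PySem.Str.strip p) := by simp [cleanTok, hp]
      rw [List.filterMap_cons, hct, ih]; simp [hp]

theorem split_pipe_eq (s : String) :
    (PySem.Str.split? s "|").getD [] = (spPipe s.toList).map String.ofList := by
  simp [PySem.Str.split?, PySem.Chars.split?, splitOn_pipe]

theorem inner_loop_eq (ps : List String) (items : List String) :
    ps.foldl (fun items part =>
      let cleaned := PySem.Str.strip part
      if cleaned ≠ "" then items ++ [cleaned] else items) items
    = items ++ ps.filterMap cleanTok := by
  rw [filterMap_clean_eq]
  exact PySem.List.foldl_append_ite (fun p => PySem.Str.strip p ≠ "") PySem.Str.strip ps items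

theorem parse_A_flatMap (values : List String) :
    parse_pipe_values values
      = values.flatMap (fun v => ((spPipe v.toList).map String.ofList).filterMap cleanTok) := by
  unfold parse_pipe_values
  have hstep : (fun items value =>
      ((PySem.Str.split? value "|").getD []).foldl (fun items part =>
        let cleaned := PySem.Str.strip part
        if cleaned ≠ "" then items ++ [cleaned] else items) items)
      = fun (items : List String) value =>
        items ++ ((spPipe value.toList).map String.ofList).filterMap cleanTok := by
    funext items value
    rw [split_pipe_eq, inner_loop_eq]
  rw [hstep, PySem.List.foldl_append_eq_flatMap]
  simp

-- ===== VERDICT (by name: the statement is the Claim_ definition above) =====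
theorem parse_pipe_values_spec : Claim_equal_parse_pipe_values := by
  intro values _
  show parse_pipe_values values = parse_pipe_values_alt values
  cases values with
  | nil => decide
  | cons v vs =>
    rw [parse_A_flatMap]
    unfold parse_pipe_values_alt
    rw [split_pipe_eq]
    have hjl : (PySem.Str.join "|" (v :: vs)).toList
        = PySem.Chars.join ['|'] ((v :: vs).map String.toList) := by
      simp [PySem.Str.toList_join "|" (v :: vs)]
    rw [hjl, spPipe_join _ (by simp)]
    simp [List.filterMap_flatMap, List.flatMap_map, cleanTok]
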